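-- pv_equiv track=rewrite | github.com/pdabrow11/Random-Forest-Roulette | random_forest.py | are_the_same
-- ===== SOURCE A (Python) =====
-- def are_the_same(node):
-- 	res = True
-- 	for i in range(0, len(node[0])-1):
-- 		for j in range(0, len(node)):
-- 			for k in range(0, len(node)):
-- 				if node[j][i] != node[k][i]:
-- 					res = False
-- 					return res
-- 	return res
-- ===== SOURCE B (Python) =====
-- def are_the_same(node):
--     w = len(node[0]) - 1
--     if w <= 0:
--         return True
--     first = node[0][:w]
--     for row in node:
--         if row[:w] != first:
--             return False
--     return True
-- ===== Notes on version B (the rewrite author's own statement) =====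
-- stated objective: faster
-- what changed: Replaces A's triple nested all-pairs column-by-column scan with a single row-wise pass comparing each row's prefix slice against the first row's prefix computed once.
import Mathlib
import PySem

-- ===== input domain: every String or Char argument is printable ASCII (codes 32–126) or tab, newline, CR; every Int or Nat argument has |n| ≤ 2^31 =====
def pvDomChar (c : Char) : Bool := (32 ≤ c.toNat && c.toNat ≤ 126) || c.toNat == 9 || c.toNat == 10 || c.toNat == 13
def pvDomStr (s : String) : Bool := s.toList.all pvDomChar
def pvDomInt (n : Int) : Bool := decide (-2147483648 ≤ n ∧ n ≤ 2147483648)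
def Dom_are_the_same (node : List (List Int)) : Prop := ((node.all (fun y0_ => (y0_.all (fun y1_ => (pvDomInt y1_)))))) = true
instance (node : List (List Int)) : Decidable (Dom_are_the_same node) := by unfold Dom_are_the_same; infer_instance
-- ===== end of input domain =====

-- B replaces A's all-pairs column-by-column scan with one row-wise pass comparing prefix slices
-- to the first row's prefix (asymptotically fewer comparisons).

-- ===== PORT A =====
-- Triple nested loop with early 'return False' on the first mismatch: ported as .any over the
-- same three ranges (i over columns, j and k over rows). The out-of-range accesses on which
-- Python raises IndexError are excluded by Pre_; the pyGetD default is never read inside Pre_.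
def are_the_same (node : List (List Int)) : Bool :=
  if (PySem.List.pyRange 0 (((PySem.List.pyGetD node 0 []).length : Int) - 1) 1).any (fun i =>
      (PySem.List.pyRange 0 ((node.length : Int)) 1).any (fun j =>
        (PySem.List.pyRange 0 ((node.length : Int)) 1).any (fun k =>
          PySem.List.pyGetD (PySem.List.pyGetD node j []) i 0
            != PySem.List.pyGetD (PySem.List.pyGetD node k []) i 0)))
  then false else true

-- ===== PORT B =====
def are_the_same_alt (node : List (List Int)) : Bool :=
  let w : Int := ((PySem.List.pyGetD node 0 []).length : Int) - 1
  if w ≤ 0 then true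
  else
    let first := PySem.List.slice (PySem.List.pyGetD node 0 []) none (some w)
    node.all (fun row => PySem.List.slice row none (some w) == first)

-- ===== PRECONDITION & SPEC =====
-- Pre_ = exactly the inputs on which Python A returns (no IndexError): node is nonempty, and A's
-- column-major scan never reaches an out-of-range access: for every column i (whose earlier
-- columns all completed, i.e. were in range and uniform), there is no first short row j0 that the
-- scan would reach, i.e. no j0 with row j0 too short, all earlier rows long enough, and all
-- earlier rows agreeing with row 0 at column i (a disagreement would return False before the raise).
def Pre_are_the_same (node : List (List Int)) : Prop :=
  node ≠ [] ∧
  ∀ i < (node.getD 0 []).length - 1,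
    (∀ i' < i, ∀ r ∈ node, i' < r.length ∧ r.getD i' 0 = (node.getD 0 []).getD i' 0) →
    ¬ ∃ j0 < node.length, (node.getD j0 []).length ≤ i ∧
        (∀ j < j0, i < (node.getD j []).length) ∧
        (∀ k < j0, (node.getD k []).getD i 0 = (node.getD 0 []).getD i 0)
instance (node : List (List Int)) : Decidable (Pre_are_the_same node) := by
  unfold Pre_are_the_same; infer_instance

def pvWitness_are_the_same : List (List Int) := [[1, 2], [1, 3]]

def Spec_are_the_same (node : List (List Int)) (out : Bool) : Prop := out = are_the_same_alt node
instance (node : List (List Int)) (out : Bool) : Decidable (Spec_are_the_same node out) := by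
  unfold Spec_are_the_same; infer_instance

-- ===== CLAIM (what is proved, stated in full; the proofs are below) =====
def Claim_equal_are_the_same : Prop := ∀ (node : List (List Int)), Dom_are_the_same node → Pre_are_the_same node → Spec_are_the_same node (are_the_same node)

-- ===== LEMMAS AND PROOFS =====

-- A's port is true iff no pair of rows disagrees in any scanned column (Int-indexed form).
lemma portA_true_iff (node : List (List Int)) :
    are_the_same node = true ↔
      ∀ i : Int, 0 ≤ i → i < ((node.getD 0 []).length : Int) - 1 →
        ∀ j : Int, 0 ≤ j → j < (node.length : Int) →
          ∀ k : Int, 0 ≤ k → k < (node.length : Int) →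
            PySem.List.pyGetD (PySem.List.pyGetD node j []) i 0
              = PySem.List.pyGetD (PySem.List.pyGetD node k []) i 0 := by
  simp only [are_the_same, PySem.List.pyGetD_zero]
  split_ifs with hc
  · simp only [false_iff]
    simp only [List.any_eq_true, PySem.List.mem_pyRange_one, bne_iff_ne] at hc
    obtain ⟨i, ⟨hi0, hiw⟩, j, ⟨hj0, hjn⟩, k, ⟨hk0, hkn⟩, hne⟩ := hc
    intro hP
    exact hne (hP i hi0 hiw j hj0 hjn k hk0 hkn)
  · simp only [true_iff]
    simp only [List.any_eq_true, PySem.List.mem_pyRange_one, bne_iff_ne, not_exists, not_and] at hc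
    intro i hi0 hiw j hj0 hjn k hk0 hkn
    by_contra hne
    exact hc i ⟨hi0, hiw⟩ j ⟨hj0, hjn⟩ k ⟨hk0, hkn⟩ hne

-- B's port is true iff every row's length-W prefix equals the first row's (case W ≥ 1).
lemma portB_true_iff (node : List (List Int)) (W : Nat)
    (hL : (node.getD 0 []).length = W + 1) (hW : 1 ≤ W) :
    are_the_same_alt node = true ↔
      ∀ r ∈ node, r.take W = (node.getD 0 []).take W := by
  have hw : ((node.getD 0 []).length : Int) - 1 = (W : Int) := by
    rw [hL]; push_cast; ring
  simp only [are_the_same_alt, PySem.List.pyGetD_zero]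
  rw [hw, if_neg (by omega)]
  simp only [PySem.List.slice_to_natCast, List.all_eq_true, beq_iff_eq]

-- Core: under Pre_, every row agrees with row 0 on every scanned column (in particular is long
-- enough), provided A's scan finds no mismatch. Strong induction over the column index.
lemma cols_ok (node : List (List Int)) (W : Nat)
    (hne : node ≠ []) (hL : (node.getD 0 []).length = W + 1)
    (hpre : Pre_are_the_same node)
    (hA : ∀ i : Int, 0 ≤ i → i < ((node.getD 0 []).length : Int) - 1 →
        ∀ j : Int, 0 ≤ j → j < (node.length : Int) →
          ∀ k : Int, 0 ≤ k → k < (node.length : Int) →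
            PySem.List.pyGetD (PySem.List.pyGetD node j []) i 0
              = PySem.List.pyGetD (PySem.List.pyGetD node k []) i 0) :
    ∀ i < W, ∀ r ∈ node, i < r.length ∧ r.getD i 0 = (node.getD 0 []).getD i 0 := by
  have hn : 0 < node.length := List.length_pos_iff.mpr hne
  have hA' : ∀ i j k : Nat, i < W → j < node.length → k < node.length →
      (node.getD j []).getD i 0 = (node.getD k []).getD i 0 := by
    intro i j k hi hj hk
    have := hA (i : Int) (by positivity) (by rw [hL]; push_cast; omega)
      (j : Int) (by positivity) (by exact_mod_cast hj)
      (k : Int) (by positivity) (by exact_mod_cast hk)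
    simpa using this
  intro i
  induction i using Nat.strong_induction_on with
  | _ i ih =>
    intro hiW
    -- first: all rows are long enough at column i
    have hlong : ∀ r ∈ node, i < r.length := by
      by_contra hshort
      push_neg at hshort
      obtain ⟨r, hr, hrlen⟩ := hshort
      obtain ⟨jw, hjw, hjr⟩ := List.mem_iff_getElem.mp hr
      have hPjw : (node.getD jw []).length ≤ i := by
        rw [List.getD_eq_getElem node [] hjw, hjr]; omega
      have hex : ∃ j, (node.getD j []).length ≤ i := ⟨jw, hPjw⟩
      have hj0 : (node.getD (Nat.find hex) []).length ≤ i := Nat.find_spec hex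
      have hj0lt : Nat.find hex < node.length := lt_of_le_of_lt (Nat.find_min' hex hPjw) hjw
      have hraise : ∃ j0 < node.length, (node.getD j0 []).length ≤ i ∧
          (∀ j < j0, i < (node.getD j []).length) ∧
          (∀ k < j0, (node.getD k []).getD i 0 = (node.getD 0 []).getD i 0) := by
        refine ⟨Nat.find hex, hj0lt, hj0, ?_, ?_⟩
        · intro j hj
          have := Nat.find_min hex hj
          omega
        · intro k hk
          exact hA' i k 0 hiW (lt_trans hk hj0lt) hn
      have hcols : ∀ i' < i, ∀ r' ∈ node, i' < r'.length ∧
          r'.getD i' 0 = (node.getD 0 []).getD i' 0 := fun i' hi' => ih i' hi' (by omega)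
      exact hpre.2 i (by omega) hcols hraise
    -- then: every row agrees with row 0 at column i
    intro r hr
    refine ⟨hlong r hr, ?_⟩
    obtain ⟨jr, hjr, hjre⟩ := List.mem_iff_getElem.mp hr
    have := hA' i jr 0 hiW hjr hn
    rwa [List.getD_eq_getElem node [] hjr, hjre] at this

-- prefix equality from column agreement
lemma take_eq_of_cols (W : Nat) (r L0 : List Int) (hWL0 : W ≤ L0.length)
    (h : ∀ i < W, i < r.length ∧ r.getD i 0 = L0.getD i 0) :
    r.take W = L0.take W := by
  have hWr : W ≤ r.length := by
    by_contra hc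
    push_neg at hc
    exact absurd (h r.length hc).1 (lt_irrefl _)
  apply List.ext_getElem
  · simp [hWr, hWL0]
  · intro i h1 h2
    simp only [List.getElem_take]
    have hi : i < W := by simpa [hWr] using h1
    have := (h i hi).2
    rwa [List.getD_eq_getElem r 0 (by omega), List.getD_eq_getElem L0 0 (by omega)] at this

-- column agreement from prefix equality (no Pre_ needed)
lemma cols_of_take (node : List (List Int)) (W : Nat)
    (hL : (node.getD 0 []).length = W + 1)
    (hB : ∀ r ∈ node, r.take W = (node.getD 0 []).take W) :
    ∀ i : Int, 0 ≤ i → i < ((node.getD 0 []).length : Int) - 1 →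
      ∀ j : Int, 0 ≤ j → j < (node.length : Int) →
        ∀ k : Int, 0 ≤ k → k < (node.length : Int) →
          PySem.List.pyGetD (PySem.List.pyGetD node j []) i 0
            = PySem.List.pyGetD (PySem.List.pyGetD node k []) i 0 := by
  have key : ∀ r ∈ node, ∀ i < W, r.getD i 0 = (node.getD 0 []).getD i 0 := by
    intro r hr i hi
    have htake := hB r hr
    have hlen : W ≤ r.length := by
      have h1 := congrArg List.length htake
      simp only [List.length_take] at h1
      omega
    have hL' : (node[0]?.getD []).length = W + 1 := hL
    have h2 : (r.take W)[i]'(by simp [List.length_take]; omega)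
        = ((node.getD 0 []).take W)[i]'(by simp [List.length_take]; omega) := by
      simp only [htake]
    simp only [List.getElem_take] at h2
    rwa [List.getD_eq_getElem r 0 (by omega), List.getD_eq_getElem _ 0 (by omega)]
  intro i hi0 hiw j hj0 hjn k hk0 hkn
  obtain ⟨i', rfl⟩ := Int.eq_ofNat_of_zero_le hi0
  obtain ⟨j', rfl⟩ := Int.eq_ofNat_of_zero_le hj0
  obtain ⟨k', rfl⟩ := Int.eq_ofNat_of_zero_le hk0
  have hiW : i' < W := by rw [hL] at hiw; omega
  have hj' : j' < node.length := by exact_mod_cast hjn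
  have hk' : k' < node.length := by exact_mod_cast hkn
  have hjm : node.getD j' [] ∈ node := by
    rw [List.getD_eq_getElem node [] hj']; exact List.getElem_mem hj'
  have hkm : node.getD k' [] ∈ node := by
    rw [List.getD_eq_getElem node [] hk']; exact List.getElem_mem hk'
  simp only [PySem.List.pyGetD_natCast]
  rw [key _ hjm i' hiW, key _ hkm i' hiW]

-- ===== VERDICT (by name: the statement is the Claim_ definition above) =====
theorem are_the_same_spec : Claim_equal_are_the_same := by
  intro node _ hpre
  unfold Spec_are_the_same
  have hne := hpre.1
  rcases Nat.lt_or_ge (node.getD 0 []).length 2 with hsmall | hbig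
  · -- w ≤ 0: A's column range is empty, B takes the 'if' branch: both true
    have hw : ((node.getD 0 []).length : Int) - 1 ≤ 0 := by omega
    have hA : are_the_same node = true := by
      simp only [are_the_same, PySem.List.pyGetD_zero]
      rw [PySem.List.pyRange_one_eq_nil hw]
      simp
    have hB : are_the_same_alt node = true := by
      simp only [are_the_same_alt, PySem.List.pyGetD_zero]
      rw [if_pos hw]
    rw [hA, hB]
  · -- W ≥ 1
    obtain ⟨W, hL, hW⟩ : ∃ W, (node.getD 0 []).length = W + 1 ∧ 1 ≤ W :=
      ⟨(node.getD 0 []).length - 1, by omega, by omega⟩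
    have hiff : are_the_same node = true ↔ are_the_same_alt node = true := by
      rw [portA_true_iff, portB_true_iff node W hL hW]
      constructor
      · intro hA r hr
        exact take_eq_of_cols W r (node.getD 0 []) (by omega)
          (fun i hi => cols_ok node W hne hL hpre hA i hi r hr)
      · intro hB
        exact cols_of_take node W hL hB
    cases hA : are_the_same node
    · cases hB : are_the_same_alt node
      · rfl
      · exact absurd (hiff.mpr hB) (by simp [hA])
    · exact (hiff.mp hA).symm
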